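-- pv_equiv track=rewrite | github.com/aalacy/storelocatore-scrapers | apify/MrQwerty1/storelocator/baystatehealth_org/scrape.py | clean_hours
-- ===== SOURCE A (Python) =====
-- def clean_hours(line):
--     line = line.replace("Main Clinic Facility:;300 Birnie Avenue Springfield, MA;", "")
--     splitters = [
--         "(",
--         "We ",
--         "Holidays",
--         "Times",
--         "*",
--         "Patient",
--         "Open for",
--         "Ultrasound",
--         "Screenings",
--         "Xray",
--         "Physical",
--     ]
--     for s in splitters:
--         if s in line:
--             line = line.split(s)[0].strip()
--
--     return line
-- ===== SOURCE B (Python) =====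
-- def clean_hours(line):
--     line = line.replace("Main Clinic Facility:;300 Birnie Avenue Springfield, MA;", "")
--     splitters = [
--         "(",
--         "We ",
--         "Holidays",
--         "Times",
--         "*",
--         "Patient",
--         "Open for",
--         "Ultrasound",
--         "Screenings",
--         "Xray",
--         "Physical",
--     ]
--     # keep a window [lo, hi) into line instead of rebuilding strings
--     lo, hi = 0, len(line)
--     for s in splitters:
--         j = line.find(s, lo)
--         if j != -1 and j + len(s) <= hi:
--             hi = j
--             while lo < hi and line[lo].isspace():
--                 lo += 1
--             while lo < hi and line[hi - 1].isspace():
--                 hi -= 1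
--     return line[lo:hi]
-- ===== Notes on version B (the rewrite author's own statement) =====
-- stated objective: alternative
-- what changed: Instead of repeatedly splitting the string and re-stripping to build a new string at every matched splitter, B keeps a window [lo, hi) of indices into the line, narrows hi to the found index, moves lo/hi past whitespace, and performs a single slice at the end.
import Mathlib
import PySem

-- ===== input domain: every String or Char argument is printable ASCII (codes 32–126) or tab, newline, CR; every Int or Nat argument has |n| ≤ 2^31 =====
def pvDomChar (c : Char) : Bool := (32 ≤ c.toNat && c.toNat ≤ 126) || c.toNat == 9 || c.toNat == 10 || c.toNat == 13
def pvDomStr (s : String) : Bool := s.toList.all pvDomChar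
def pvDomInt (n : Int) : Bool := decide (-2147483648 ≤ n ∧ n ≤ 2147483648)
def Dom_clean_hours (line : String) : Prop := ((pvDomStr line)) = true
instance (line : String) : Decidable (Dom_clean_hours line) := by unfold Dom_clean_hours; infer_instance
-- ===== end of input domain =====

-- B keeps a window [lo, hi) of indices into the line instead of rebuilding a string at
-- every matched splitter: one final slice (objective: alternative/simpler mechanics,
-- no intermediate string allocations). Return values proved equal on all inputs.

-- ===== PORT A =====
def clean_hours (line : String) : String :=
  let cs := (PySem.Str.replace line "Main Clinic Facility:;300 Birnie Avenue Springfield, MA;" "").toList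
  let splitters : List (List Char) :=
    ["(".toList, "We ".toList, "Holidays".toList, "Times".toList, "*".toList,
     "Patient".toList, "Open for".toList, "Ultrasound".toList, "Screenings".toList,
     "Xray".toList, "Physical".toList]
  String.ofList (splitters.foldl (fun cur s =>
    if PySem.Chars.isIn s cur then
      -- line.split(s)[0].strip(): split with a nonempty sep is Chars.splitOn, which
      -- always returns at least one piece, so Python's [0] is headD
      PySem.Chars.strip ((PySem.Chars.splitOn cur s).headD [])
    else cur) cs)

-- ===== PORT B =====
-- while lo < hi and line[lo].isspace(): lo += 1   (index access is in range: lo < hi ≤ len)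
def pvLstrip (cs : List Char) (lo hi : Nat) : Nat :=
  if h : lo < hi ∧ PySem.Chars.isspace (cs.getD lo ' ') then pvLstrip cs (lo + 1) hi else lo
termination_by hi - lo
decreasing_by omega

-- while lo < hi and line[hi-1].isspace(): hi -= 1
def pvRstrip (cs : List Char) (lo hi : Nat) : Nat :=
  if h : lo < hi ∧ PySem.Chars.isspace (cs.getD (hi - 1) ' ') then pvRstrip cs lo (hi - 1) else hi
termination_by hi - lo
decreasing_by omega

def clean_hours_alt (line : String) : String :=
  let cs := (PySem.Str.replace line "Main Clinic Facility:;300 Birnie Avenue Springfield, MA;" "").toList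
  let splitters : List (List Char) :=
    ["(".toList, "We ".toList, "Holidays".toList, "Times".toList, "*".toList,
     "Patient".toList, "Open for".toList, "Ultrasound".toList, "Screenings".toList,
     "Xray".toList, "Physical".toList]
  let p := splitters.foldl (fun (p : Nat × Nat) s =>
    let j := PySem.Chars.findFrom cs s (p.1 : Int) none   -- line.find(s, lo)
    if j ≠ -1 ∧ j + (s.length : Int) ≤ (p.2 : Int) then
      let hi := j.toNat
      let lo := pvLstrip cs p.1 hi
      (lo, pvRstrip cs lo hi)
    else p) (0, cs.length)
  String.ofList (PySem.List.slice cs (some (p.1 : Int)) (some (p.2 : Int)))   -- line[lo:hi]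

-- ===== PRECONDITION & SPEC =====
def Spec_clean_hours (line : String) (out : String) : Prop := out = clean_hours_alt line
instance (line : String) (out : String) : Decidable (Spec_clean_hours line out) := by unfold Spec_clean_hours; infer_instance

-- ===== CLAIM (what is proved, stated in full; the proofs are below) =====
def Claim_equal_clean_hours : Prop := ∀ (line : String), Dom_clean_hours line → Spec_clean_hours line (clean_hours line)

-- ===== LEMMAS AND PROOFS =====

-- A's loop body and B's loop body, named for the proofs (definitionally the ports' lambdas)
def pvAStep (cur s : List Char) : List Char :=
  if PySem.Chars.isIn s cur then PySem.Chars.strip ((PySem.Chars.splitOn cur s).headD []) else cur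

def pvBStep (cs : List Char) (p : Nat × Nat) (s : List Char) : Nat × Nat :=
  let j := PySem.Chars.findFrom cs s (p.1 : Int) none
  if j ≠ -1 ∧ j + (s.length : Int) ≤ (p.2 : Int) then
    let hi := j.toNat
    let lo := pvLstrip cs p.1 hi
    (lo, pvRstrip cs lo hi)
  else p

-- the window [lo, hi) of cs as a list
def pvS (cs : List Char) (lo hi : Nat) : List Char := (cs.drop lo).take (hi - lo)

-- accumulator lemma for splitOn.go
lemma pv_go_acc (sep : List Char) : ∀ (fuel : Nat) (l cur : List Char) (acc : List (List Char)),
    PySem.Chars.splitOn.go sep fuel l cur acc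
      = acc.reverse ++ PySem.Chars.splitOn.go sep fuel l cur [] := by
  intro fuel
  induction fuel with
  | zero =>
    intro l cur acc
    rw [PySem.Chars.splitOn.go.eq_1, PySem.Chars.splitOn.go.eq_1]
    simp
  | succ n ih =>
    intro l cur acc
    cases l with
    | nil =>
      rw [PySem.Chars.splitOn.go.eq_2 sep (n + 1) cur acc (by omega),
          PySem.Chars.splitOn.go.eq_2 sep (n + 1) cur [] (by omega)]
      simp
    | cons c rest =>
      rw [PySem.Chars.splitOn.go.eq_3, PySem.Chars.splitOn.go.eq_3]
      by_cases hp : sep.isPrefixOf (c :: rest) = true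
      · rw [if_pos hp, if_pos hp,
            ih (List.drop sep.length (c :: rest)) [] (cur.reverse :: acc),
            ih (List.drop sep.length (c :: rest)) [] [cur.reverse]]
        simp
      · rw [if_neg hp, if_neg hp, ih rest (c :: cur) acc]

-- head of split: the piece before the first occurrence
lemma pv_go_head (sep : List Char) (hs : sep ≠ []) :
    ∀ (fuel : Nat) (l cur : List Char) (j : Nat), l.length < fuel →
      sep <+: l.drop j → (∀ i < j, ¬ sep <+: l.drop i) →
      (PySem.Chars.splitOn.go sep fuel l cur []).headD [] = cur.reverse ++ l.take j := by
  intro fuel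
  induction fuel with
  | zero => intro l cur j hf _ _; omega
  | succ n ih =>
    intro l cur j hf hocc hmin
    cases l with
    | nil =>
      exfalso
      rw [List.drop_nil] at hocc
      exact hs (List.prefix_nil.mp hocc)
    | cons c rest =>
      rw [PySem.Chars.splitOn.go.eq_3]
      by_cases hp : sep.isPrefixOf (c :: rest) = true
      · have hj : j = 0 := by
          by_contra hj0
          exact hmin 0 (by omega) (by simpa using List.isPrefixOf_iff_prefix.mp hp)
        subst hj
        rw [if_pos hp, pv_go_acc]
        simp
      · have hj : j ≠ 0 := by
          intro hj0; subst hj0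
          exact hp (List.isPrefixOf_iff_prefix.mpr (by simpa using hocc))
        obtain ⟨j', rfl⟩ : ∃ j', j = j' + 1 := ⟨j - 1, by omega⟩
        rw [if_neg hp]
        have := ih rest (c :: cur) j' (by simpa using Nat.lt_of_succ_lt_succ hf)
          (by simpa using hocc)
          (fun i hi => by simpa using hmin (i + 1) (by omega))
        rw [this]
        simp [List.take_succ_cons]

lemma pv_splitOn_head (sep l : List Char) (hs : sep ≠ []) (j : Nat)
    (h1 : sep <+: l.drop j) (h2 : ∀ i < j, ¬ sep <+: l.drop i) :
    (PySem.Chars.splitOn l sep).headD [] = l.take j := by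
  have := pv_go_head sep hs (l.length + 1) l [] j (by omega) h1 h2
  simpa [PySem.Chars.splitOn] using this

-- occurrences inside the window are occurrences of cs that end before hi
lemma pv_occ_iff (cs s : List Char) (hs : s ≠ []) (lo hi i : Nat) :
    s <+: (pvS cs lo hi).drop i ↔ (lo + i + s.length ≤ hi ∧ s <+: cs.drop (lo + i)) := by
  have hlen : 0 < s.length := List.length_pos_of_ne_nil hs
  unfold pvS
  rw [List.drop_take, List.drop_drop, List.prefix_take_iff]
  constructor
  · rintro ⟨hp, hl⟩; exact ⟨by omega, hp⟩
  · rintro ⟨hl, hp⟩; exact ⟨hp, by omega⟩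

-- window decomposition at the left end
lemma pv_slice_cons (cs : List Char) (lo hi : Nat) (hlt : lo < hi) (hhi : hi ≤ cs.length) :
    pvS cs lo hi = cs[lo]'(by omega) :: pvS cs (lo + 1) hi := by
  unfold pvS
  rw [List.drop_eq_getElem_cons (by omega)]
  have h3 : hi - lo = (hi - (lo + 1)) + 1 := by omega
  rw [h3, List.take_succ_cons]

-- window decomposition at the right end
lemma pv_slice_snoc (cs : List Char) (lo hi : Nat) (hlt : lo < hi) (hhi : hi ≤ cs.length) :
    pvS cs lo hi = pvS cs lo (hi - 1) ++ [cs[hi - 1]'(by omega)] := by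
  unfold pvS
  have h1 : hi - lo = (hi - 1 - lo) + 1 := by omega
  rw [h1, List.take_succ]
  congr 1
  have h4 : (cs.drop lo)[hi - 1 - lo]? = some (cs[hi - 1]'(by omega)) := by
    have hidx : lo + (hi - 1 - lo) = hi - 1 := by omega
    rw [List.getElem?_drop, hidx, List.getElem?_eq_getElem (by omega)]
  simp [h4]

lemma pv_lstrip_slice (cs : List Char) : ∀ (n lo hi : Nat), hi - lo ≤ n → lo ≤ hi → hi ≤ cs.length →
    PySem.Chars.lstrip (pvS cs lo hi) = pvS cs (pvLstrip cs lo hi) hi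
      ∧ lo ≤ pvLstrip cs lo hi ∧ pvLstrip cs lo hi ≤ hi := by
  intro n
  induction n with
  | zero =>
    intro lo hi hn h1 h2
    have heq : lo = hi := by omega
    subst heq
    rw [pvLstrip]
    simp [pvS, PySem.Chars.lstrip]
  | succ n ih =>
    intro lo hi hn h1 h2
    by_cases hc : lo < hi ∧ PySem.Chars.isspace (cs.getD lo ' ')
    · obtain ⟨hlt, hsp⟩ := hc
      have hget : cs.getD lo ' ' = cs[lo]'(by omega) := List.getD_eq_getElem cs ' ' (by omega)
      rw [pv_slice_cons cs lo hi hlt h2]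
      rw [pvLstrip]
      rw [dif_pos ⟨hlt, hsp⟩]
      have hstep : PySem.Chars.lstrip (cs[lo]'(by omega) :: pvS cs (lo + 1) hi)
          = PySem.Chars.lstrip (pvS cs (lo + 1) hi) := by
        unfold PySem.Chars.lstrip
        rw [List.dropWhile_cons, if_pos (by rw [← hget]; exact hsp)]
      rw [hstep]
      have := ih (lo + 1) hi (by omega) (by omega) h2
      exact ⟨this.1, by omega, this.2.2⟩
    · rw [pvLstrip, dif_neg hc]
      refine ⟨?_, le_refl _, h1⟩
      rcases Nat.lt_or_ge lo hi with hlt | hge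
      · have hsp : PySem.Chars.isspace (cs.getD lo ' ') = false := by
          rcases Bool.eq_false_or_eq_true (PySem.Chars.isspace (cs.getD lo ' ')) with h | h
          · exact absurd ⟨hlt, h⟩ hc
          · exact h
        have hget : cs.getD lo ' ' = cs[lo]'(by omega) := List.getD_eq_getElem cs ' ' (by omega)
        rw [pv_slice_cons cs lo hi hlt h2]
        unfold PySem.Chars.lstrip
        rw [List.dropWhile_cons, if_neg (by rw [← hget, hsp]; simp)]
      · have heq : lo = hi := by omega
        subst heq
        simp [pvS, PySem.Chars.lstrip]

lemma pv_rstrip_slice (cs : List Char) : ∀ (n lo hi : Nat), hi - lo ≤ n → lo ≤ hi → hi ≤ cs.length →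
    PySem.Chars.rstrip (pvS cs lo hi) = pvS cs lo (pvRstrip cs lo hi)
      ∧ lo ≤ pvRstrip cs lo hi ∧ pvRstrip cs lo hi ≤ hi := by
  intro n
  induction n with
  | zero =>
    intro lo hi hn h1 h2
    have heq : lo = hi := by omega
    subst heq
    rw [pvRstrip]
    simp [pvS, PySem.Chars.rstrip]
  | succ n ih =>
    intro lo hi hn h1 h2
    by_cases hc : lo < hi ∧ PySem.Chars.isspace (cs.getD (hi - 1) ' ')
    · obtain ⟨hlt, hsp⟩ := hc
      have hget : cs.getD (hi - 1) ' ' = cs[hi - 1]'(by omega) := List.getD_eq_getElem cs ' ' (by omega)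
      rw [pv_slice_snoc cs lo hi hlt h2]
      rw [pvRstrip]
      rw [dif_pos ⟨hlt, hsp⟩]
      have hstep : PySem.Chars.rstrip (pvS cs lo (hi - 1) ++ [cs[hi - 1]'(by omega)])
          = PySem.Chars.rstrip (pvS cs lo (hi - 1)) := by
        unfold PySem.Chars.rstrip
        rw [List.reverse_append]
        simp only [List.reverse_cons, List.reverse_nil, List.nil_append, List.cons_append,
          List.dropWhile_cons]
        rw [if_pos (by rw [← hget]; exact hsp)]
      rw [hstep]
      have := ih lo (hi - 1) (by omega) (by omega) (by omega)
      exact ⟨this.1, this.2.1, by omega⟩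
    · rw [pvRstrip, dif_neg hc]
      refine ⟨?_, h1, le_refl _⟩
      rcases Nat.lt_or_ge lo hi with hlt | hge
      · have hsp : PySem.Chars.isspace (cs.getD (hi - 1) ' ') = false := by
          rcases Bool.eq_false_or_eq_true (PySem.Chars.isspace (cs.getD (hi - 1) ' ')) with h | h
          · exact absurd ⟨hlt, h⟩ hc
          · exact h
        have hget : cs.getD (hi - 1) ' ' = cs[hi - 1]'(by omega) := List.getD_eq_getElem cs ' ' (by omega)
        rw [pv_slice_snoc cs lo hi hlt h2]
        unfold PySem.Chars.rstrip
        rw [List.reverse_append]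
        simp only [List.reverse_cons, List.reverse_nil, List.nil_append, List.cons_append,
          List.dropWhile_cons]
        rw [if_neg (by rw [← hget, hsp]; simp)]
        simp
      · have heq : lo = hi := by omega
        subst heq
        simp [pvS, PySem.Chars.rstrip]

-- one loop step: A's new string is B's new window
lemma pv_step (cs s : List Char) (hs : s ≠ []) (lo hi : Nat) (h1 : lo ≤ hi) (h2 : hi ≤ cs.length) :
    pvAStep (pvS cs lo hi) s = pvS cs (pvBStep cs (lo, hi) s).1 (pvBStep cs (lo, hi) s).2
      ∧ (pvBStep cs (lo, hi) s).1 ≤ (pvBStep cs (lo, hi) s).2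
      ∧ (pvBStep cs (lo, hi) s).2 ≤ cs.length := by
  have hlen : 0 < s.length := List.length_pos_of_ne_nil hs
  have hlo : lo ≤ cs.length := le_trans h1 h2
  by_cases hc : PySem.Chars.findFrom cs s (lo : Int) none ≠ -1 ∧
      PySem.Chars.findFrom cs s (lo : Int) none + (s.length : Int) ≤ (hi : Int)
  · obtain ⟨hne1, hle1⟩ := hc
    obtain ⟨hgeF, hoccF, hminF⟩ := PySem.Chars.findFrom_natCast_spec cs s lo hlo hne1
    set t := (PySem.Chars.findFrom cs s (lo : Int) none).toNat with ht
    have hFt : PySem.Chars.findFrom cs s (lo : Int) none = (t : Int) := by omega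
    have htlo : lo ≤ t := by omega
    have htend : t + s.length ≤ hi := by omega
    have hocc : s <+: (pvS cs lo hi).drop (t - lo) :=
      (pv_occ_iff cs s hs lo hi (t - lo)).mpr
        ⟨by omega, by rw [show lo + (t - lo) = t by omega]; exact hoccF⟩
    have hisin : PySem.Chars.isIn s (pvS cs lo hi) = true :=
      (PySem.Chars.exists_prefix_drop_iff_isIn s (pvS cs lo hi)).mp ⟨t - lo, hocc⟩
    have hmin : ∀ i < t - lo, ¬ s <+: (pvS cs lo hi).drop i := by
      intro i hilt hpre
      obtain ⟨hend, hoc⟩ := (pv_occ_iff cs s hs lo hi i).mp hpre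
      exact hminF (lo + i) (by omega) (by omega) hoc
    have htake : (pvS cs lo hi).take (t - lo) = pvS cs lo t := by
      unfold pvS; rw [List.take_take]; congr 1; omega
    obtain ⟨hlL, hlo1, hlo2⟩ := pv_lstrip_slice cs (t - lo) lo t (le_refl _) htlo (by omega)
    obtain ⟨hrR, hr1, hr2⟩ := pv_rstrip_slice cs t (pvLstrip cs lo t) t (by omega) hlo2 (by omega)
    have hA : pvAStep (pvS cs lo hi) s
        = pvS cs (pvLstrip cs lo t) (pvRstrip cs (pvLstrip cs lo t) t) := by
      unfold pvAStep
      rw [if_pos hisin]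
      rw [pv_splitOn_head s (pvS cs lo hi) hs (t - lo) hocc hmin, htake]
      unfold PySem.Chars.strip
      rw [hlL, hrR]
    have hB : pvBStep cs (lo, hi) s
        = (pvLstrip cs lo t, pvRstrip cs (pvLstrip cs lo t) t) := by
      simp only [pvBStep]
      rw [if_pos (⟨hne1, hle1⟩ : PySem.Chars.findFrom cs s (lo : Int) none ≠ -1 ∧
            PySem.Chars.findFrom cs s (lo : Int) none + (s.length : Int) ≤ (hi : Int)), hFt]
      simp
    rw [hB] at *
    exact ⟨by rw [hA], hr1, by omega⟩
  · have hnocc : ∀ i, ¬ s <+: (pvS cs lo hi).drop i := by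
      intro i hpre
      obtain ⟨hend, hoc⟩ := (pv_occ_iff cs s hs lo hi i).mp hpre
      have hinf : s <:+: List.drop lo cs := by
        obtain ⟨a, ha⟩ := hoc
        refine ⟨(List.drop lo cs).take i, a, ?_⟩
        rw [List.append_assoc, ha, ← List.drop_drop, List.take_append_drop]
      have hne1 : PySem.Chars.findFrom cs s (lo : Int) none ≠ -1 := fun h =>
        ((PySem.Chars.findFrom_natCast_eq_neg_one_iff cs s lo hlo).mp h) hinf
      obtain ⟨hgeF, hoccF, hminF⟩ := PySem.Chars.findFrom_natCast_spec cs s lo hlo hne1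
      have hta : (PySem.Chars.findFrom cs s (lo : Int) none).toNat ≤ lo + i := by
        by_contra hgt
        exact hminF (lo + i) (by omega) (by omega) hoc
      exact hc ⟨hne1, by omega⟩
    have hisin : PySem.Chars.isIn s (pvS cs lo hi) = false := by
      cases h : PySem.Chars.isIn s (pvS cs lo hi) with
      | false => rfl
      | true =>
        obtain ⟨j, hj⟩ := (PySem.Chars.exists_prefix_drop_iff_isIn s (pvS cs lo hi)).mpr h
        exact absurd hj (hnocc j)
    have hA : pvAStep (pvS cs lo hi) s = pvS cs lo hi := by
      unfold pvAStep
      rw [if_neg (by rw [hisin]; exact Bool.false_ne_true)]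
    have hB : pvBStep cs (lo, hi) s = (lo, hi) := by
      simp only [pvBStep]
      rw [if_neg hc]
    rw [hB]
    exact ⟨by rw [hA], h1, h2⟩

lemma pv_fold (cs : List Char) : ∀ (ss : List (List Char)), (∀ s ∈ ss, s ≠ []) →
    ∀ (lo hi : Nat), lo ≤ hi → hi ≤ cs.length →
    ss.foldl pvAStep (pvS cs lo hi) = pvS cs (ss.foldl (pvBStep cs) (lo, hi)).1 (ss.foldl (pvBStep cs) (lo, hi)).2
      ∧ (ss.foldl (pvBStep cs) (lo, hi)).1 ≤ (ss.foldl (pvBStep cs) (lo, hi)).2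
      ∧ (ss.foldl (pvBStep cs) (lo, hi)).2 ≤ cs.length := by
  intro ss
  induction ss with
  | nil => intro _ lo hi h1 h2; exact ⟨rfl, h1, h2⟩
  | cons s t ih =>
    intro hne lo hi h1 h2
    have hstep := pv_step cs s (hne s (by simp)) lo hi h1 h2
    simp only [List.foldl_cons, hstep.1]
    exact ih (fun x hx => hne x (by simp [hx])) _ _ hstep.2.1 hstep.2.2

-- ===== VERDICT (by name: the statement is the Claim_ definition above) =====
theorem clean_hours_spec : Claim_equal_clean_hours := by
  intro line _
  unfold Spec_clean_hours clean_hours clean_hours_alt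
  have hne : ∀ s ∈ (["(".toList, "We ".toList, "Holidays".toList, "Times".toList, "*".toList,
     "Patient".toList, "Open for".toList, "Ultrasound".toList, "Screenings".toList,
     "Xray".toList, "Physical".toList] : List (List Char)), s ≠ [] := by decide
  have h := pv_fold ((PySem.Str.replace line "Main Clinic Facility:;300 Birnie Avenue Springfield, MA;" "").toList) _ hne 0 ((PySem.Str.replace line "Main Clinic Facility:;300 Birnie Avenue Springfield, MA;" "").toList).length (Nat.zero_le _) (le_refl _)
  rw [show pvS ((PySem.Str.replace line "Main Clinic Facility:;300 Birnie Avenue Springfield, MA;" "").toList) 0 ((PySem.Str.replace line "Main Clinic Facility:;300 Birnie Avenue Springfield, MA;" "").toList).length = ((PySem.Str.replace line "Main Clinic Facility:;300 Birnie Avenue Springfield, MA;" "").toList) by simp [pvS]] at h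
  simp only [PySem.List.slice_natCast]
  exact congrArg String.ofList h.1
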